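-- pv_equiv track=rewrite | github.com/Codedotexe/AOC-2020-Python | Day-20/main.py | calculateChecksums
-- ===== SOURCE A (Python) =====
-- def calculateChecksums(edgeArray):
-- 	checksum = 0
-- 	flippedChecksum = 0
-- 	for i in range(len(edgeArray)):
-- 		if edgeArray[i]:
-- 			checksum += 2**i
-- 		if edgeArray[len(edgeArray)-1-i]:
-- 			flippedChecksum += 2**i
-- 	return checksum, flippedChecksum
-- ===== SOURCE B (Python) =====
-- def calculateChecksums(edgeArray):
-- 	checksum = 0
-- 	for b in reversed(edgeArray):
-- 		checksum = checksum * 2 + (1 if b else 0)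
-- 	flippedChecksum = 0
-- 	for b in edgeArray:
-- 		flippedChecksum = flippedChecksum * 2 + (1 if b else 0)
-- 	return checksum, flippedChecksum
-- ===== Notes on version B (the rewrite author's own statement) =====
-- stated objective: faster
-- what changed: Replaces the single indexed loop that adds powers 2**i for both orientations with two Horner-accumulation passes (acc = acc*2 + bit), one over reversed(edgeArray) and one forward, eliminating indexing and the repeated big-integer power computations.
import Mathlib
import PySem

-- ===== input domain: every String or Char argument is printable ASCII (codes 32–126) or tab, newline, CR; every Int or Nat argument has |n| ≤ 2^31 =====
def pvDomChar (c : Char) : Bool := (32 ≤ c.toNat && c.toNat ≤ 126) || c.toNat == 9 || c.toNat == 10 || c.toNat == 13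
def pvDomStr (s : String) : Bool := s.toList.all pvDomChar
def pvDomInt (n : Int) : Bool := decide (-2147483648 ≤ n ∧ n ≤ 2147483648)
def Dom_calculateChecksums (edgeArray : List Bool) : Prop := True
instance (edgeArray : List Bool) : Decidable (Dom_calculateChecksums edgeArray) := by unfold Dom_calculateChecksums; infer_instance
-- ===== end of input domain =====

-- B replaces the indexed loop adding 2**i for both orientations with two Horner passes
-- (acc = acc*2 + bit), one over the reversed list and one forward; same return value.

-- ===== PORT A =====
def calculateChecksums (edgeArray : List Bool) : Int × Int :=
  (PySem.List.pyRange 0 (PySem.List.len edgeArray) 1).foldl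
    (fun (st : Int × Int) i =>
      (if PySem.List.pyGetD edgeArray i false then st.1 + 2 ^ i.toNat else st.1,
       if PySem.List.pyGetD edgeArray (PySem.List.len edgeArray - 1 - i) false then st.2 + 2 ^ i.toNat else st.2))
    (0, 0)

-- ===== PORT B =====
def hornerStep (a : Int) (b : Bool) : Int := a * 2 + (if b then 1 else 0)

def calculateChecksums_alt (edgeArray : List Bool) : Int × Int :=
  (edgeArray.reverse.foldl hornerStep 0, edgeArray.foldl hornerStep 0)

-- ===== PRECONDITION & SPEC =====
def Spec_calculateChecksums (edgeArray : List Bool) (out : Int × Int) : Prop := out = calculateChecksums_alt edgeArray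
instance (edgeArray : List Bool) (out : Int × Int) : Decidable (Spec_calculateChecksums edgeArray out) := by unfold Spec_calculateChecksums; infer_instance

-- ===== CLAIM (what is proved, stated in full; the proofs are below) =====
def Claim_equal_calculateChecksums : Prop := ∀ (edgeArray : List Bool), Dom_calculateChecksums edgeArray → Spec_calculateChecksums edgeArray (calculateChecksums edgeArray)

-- ===== LEMMAS AND PROOFS =====

/-- Little-endian value of a bool list: head is the least significant bit. -/
def bitsVal : List Bool → Int
  | [] => 0
  | b :: t => (if b then 1 else 0) + 2 * bitsVal t

lemma bitsVal_append_singleton (xs : List Bool) (b : Bool) :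
    bitsVal (xs ++ [b]) = bitsVal xs + (if b then (2 : Int) ^ xs.length else 0) := by
  induction xs with
  | nil => simp [bitsVal]
  | cons x t ih =>
    simp only [List.cons_append, bitsVal, ih, List.length_cons, pow_succ]
    split_ifs <;> ring

lemma horner_foldl (l : List Bool) (a : Int) :
    l.foldl hornerStep a = a * 2 ^ l.length + bitsVal l.reverse := by
  induction l generalizing a with
  | nil => simp [bitsVal]
  | cons b t ih =>
    simp only [List.foldl_cons, ih, List.reverse_cons, bitsVal_append_singleton,
      List.length_reverse, List.length_cons, hornerStep, pow_succ]
    split_ifs <;> ring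

lemma foldA_prefix (l : List Bool) (k : ℕ) (hk : k ≤ l.length) :
    (PySem.List.pyRange 0 (k : Int) 1).foldl
      (fun c i => if PySem.List.pyGetD l i false then c + 2 ^ i.toNat else c) 0
      = bitsVal (l.take k) := by
  induction k with
  | zero => simp [PySem.List.pyRange_one_eq_nil, bitsVal]
  | succ k ih =>
    have hk' : k ≤ l.length := Nat.le_of_succ_le hk
    have hcast : ((k + 1 : ℕ) : Int) = (k : Int) + 1 := by push_cast; ring
    rw [hcast, PySem.List.pyRange_one_succ_right (by positivity : (0:Int) ≤ (k:Int)),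
      List.foldl_append, ih hk']
    have hget : PySem.List.pyGetD l (k : Int) false = l.getD k false :=
      PySem.List.pyGetD_natCast l k false
    have htake : l.take (k + 1) = l.take k ++ [l.getD k false] := by
      rw [List.take_succ]
      congr 1
      rw [List.getD_eq_getElem l false hk, List.getElem?_eq_getElem hk]
      rfl
    rw [htake, bitsVal_append_singleton]
    simp only [List.foldl_cons, List.foldl_nil, hget, Int.toNat_natCast,
      List.length_take, Nat.min_eq_left hk']
    split_ifs <;> ring

lemma fold_flipped_eq (l : List Bool) :
    (PySem.List.pyRange 0 (l.length : Int) 1).foldl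
      (fun c i => if PySem.List.pyGetD l ((l.length : Int) - 1 - i) false then c + 2 ^ i.toNat else c) (0 : Int)
      = (PySem.List.pyRange 0 (l.length : Int) 1).foldl
      (fun c i => if PySem.List.pyGetD l.reverse i false then c + 2 ^ i.toNat else c) (0 : Int) := by
  apply PySem.List.foldl_congr_mem
  intro acc i hi
  rw [PySem.List.mem_pyRange_one] at hi
  have h1 := PySem.List.pyGetD_eq_getElem l (i := (l.length : Int) - 1 - i) false (by omega) (by omega)
  have h2 := PySem.List.pyGetD_eq_getElem l.reverse (i := i) false (by omega) (by simp; omega)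
  have hidx : ((l.length : Int) - 1 - i).toNat = l.length - 1 - i.toNat := by omega
  rw [h1, h2, List.getElem_reverse]
  simp only [hidx]

-- ===== VERDICT (by name: the statement is the Claim_ definition above) =====
theorem calculateChecksums_spec : Claim_equal_calculateChecksums := by
  intro l _
  unfold Spec_calculateChecksums calculateChecksums calculateChecksums_alt
  rw [PySem.List.foldl_prod_mk
    (f := fun c i => if PySem.List.pyGetD l i false then c + 2 ^ i.toNat else c)
    (g := fun c i => if PySem.List.pyGetD l ((PySem.List.len l) - 1 - i) false then c + 2 ^ i.toNat else c)]
  show ((PySem.List.pyRange 0 (l.length : Int) 1).foldl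
      (fun c i => if PySem.List.pyGetD l i false then c + 2 ^ i.toNat else c) 0,
    (PySem.List.pyRange 0 (l.length : Int) 1).foldl
      (fun c i => if PySem.List.pyGetD l ((l.length : Int) - 1 - i) false then c + 2 ^ i.toNat else c) 0)
    = (l.reverse.foldl hornerStep 0, l.foldl hornerStep 0)
  rw [fold_flipped_eq l]
  have hA1 := foldA_prefix l l.length (le_refl _)
  have hA2 := foldA_prefix l.reverse l.reverse.length (le_refl _)
  rw [List.take_length] at hA1
  rw [List.take_length] at hA2
  rw [List.length_reverse] at hA2
  have hB1 : l.reverse.foldl hornerStep 0 = bitsVal l := by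
    rw [horner_foldl, List.reverse_reverse]; ring
  have hB2 : l.foldl hornerStep 0 = bitsVal l.reverse := by
    rw [horner_foldl]; ring
  rw [hA1, hA2, hB1, hB2]
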